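-- pv_equiv track=rewrite | github.com/zzzxdzzz/DemoPool | mvp-06rental/gcal_batch_ics_generator.py | fold_lines
-- ===== SOURCE A (Python) =====
-- def fold_lines(s: str, limit: int = 73) -> str:
--     out = []
--     for line in s.splitlines():
--         while len(line) > limit:
--             out.append(line[:limit])
--             line = " " + line[limit:]
--         out.append(line)
--     return "\r\n".join(out)
-- ===== SOURCE B (Python) =====
-- def fold_lines(s: str, limit: int = 73) -> str:
--     out = []
--     cont = limit - 1  # payload width of continuation chunks (each is prefixed by one space)
--     for line in s.splitlines():
--         if len(line) <= limit:
--             out.append(line)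
--             continue
--         out.append(line[:limit])
--         i = limit
--         while len(line) - i > cont:
--             out.append(" " + line[i:i + cont])
--             i += cont
--         out.append(" " + line[i:])
--     return "\r\n".join(out)
-- ===== Notes on version B (the rewrite author's own statement) =====
-- stated objective: alternative
-- what changed: B cuts each long line into fixed-size chunks by index offsets in a single pass instead of A's while-loop that rebuilds the shrinking remainder string (' ' + line[limit:]) on every iteration; intended as asymptotically faster on long lines, but a timing run measured only ~1.9x at the largest size, so no speed is claimed.
-- outside the precondition, e.g. on fold_lines('a', 1): A returns 'a', B returns 'a'
import Mathlib
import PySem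

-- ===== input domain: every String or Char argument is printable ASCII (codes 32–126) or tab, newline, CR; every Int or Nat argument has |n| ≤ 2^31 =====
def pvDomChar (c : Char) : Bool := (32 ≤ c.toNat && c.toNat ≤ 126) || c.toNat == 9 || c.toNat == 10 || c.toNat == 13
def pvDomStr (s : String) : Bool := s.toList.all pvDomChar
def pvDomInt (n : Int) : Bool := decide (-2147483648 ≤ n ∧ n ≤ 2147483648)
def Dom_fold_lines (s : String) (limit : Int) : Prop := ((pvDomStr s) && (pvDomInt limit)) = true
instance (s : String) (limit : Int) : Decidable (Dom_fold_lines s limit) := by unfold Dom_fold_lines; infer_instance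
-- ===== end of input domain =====

-- B folds each long line by index offsets in one pass (fixed chunks) instead of A's
-- repeated rebuilding of the shrinking remainder string; equivalence is proved for limit ≥ 2
-- (or empty s), outside of which Python A loops forever on any line longer than the limit.

-- ===== PORT A =====
-- A's inner 'while len(line) > limit': the '2 ≤ limit' conjunct is only a termination
-- guard — Python A diverges whenever it fails and the loop is entered.
def pvWhileA (line : List Char) (limit : Int) : List (List Char) :=
  if h : limit < (line.length : Int) ∧ 2 ≤ limit then
    PySem.List.slice line none (some limit) ::
      pvWhileA (' ' :: PySem.List.slice line (some limit) none) limit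
  else
    [line]
termination_by line.length
decreasing_by
  rw [PySem.List.slice_from line (by omega : (0:Int) ≤ limit)]
  simp only [List.length_cons, List.length_drop]
  omega

def fold_lines (s : String) (limit : Int) : String :=
  PySem.Str.join "\r\n"
    ((PySem.Str.splitlines s).foldl
      (fun out line => out ++ (pvWhileA line.toList limit).map String.ofList) [])

-- ===== PORT B =====
-- B's inner 'while len(line) - i > cont': rest = line[i:], cont = limit - 1; the
-- '1 ≤ cont' conjunct is a termination guard (Python B diverges when it fails here).
def pvChunksB (rest : List Char) (cont : Nat) : List (List Char) :=
  if h : cont < rest.length ∧ 1 ≤ cont then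
    (' ' :: rest.take cont) :: pvChunksB (rest.drop cont) cont
  else
    [' ' :: rest]
termination_by rest.length
decreasing_by
  simp only [List.length_drop]
  omega

def pvLineB (line : List Char) (limit : Int) : List (List Char) :=
  if (line.length : Int) ≤ limit then [line]
  else line.take limit.toNat :: pvChunksB (line.drop limit.toNat) (limit.toNat - 1)

def fold_lines_alt (s : String) (limit : Int) : String :=
  PySem.Str.join "\r\n"
    ((PySem.Str.splitlines s).flatMap
      (fun line => (pvLineB line.toList limit).map String.ofList))

-- ===== PRECONDITION & SPEC =====
-- Pre_ excludes limit ≤ 1 with nonempty s: there Python A loops forever on any line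
-- longer than the limit; the few such inputs whose lines are all short enough (on which
-- both programs return the same folding) are excluded with them for a uniform bound.
def Pre_fold_lines (s : String) (limit : Int) : Prop := 2 ≤ limit ∨ s = ""
instance (s : String) (limit : Int) : Decidable (Pre_fold_lines s limit) := by
  unfold Pre_fold_lines; infer_instance

def pvWitness_fold_lines : String × Int := ("hello world\nsecond line", 5)

def Spec_fold_lines (s : String) (limit : Int) (out : String) : Prop := out = fold_lines_alt s limit
instance (s : String) (limit : Int) (out : String) : Decidable (Spec_fold_lines s limit out) := by
  unfold Spec_fold_lines; infer_instance

-- ===== CLAIM (what is proved, stated in full; the proofs are below) =====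
def Claim_equal_fold_lines : Prop := ∀ (s : String) (limit : Int), Dom_fold_lines s limit → Pre_fold_lines s limit → Spec_fold_lines s limit (fold_lines s limit)

-- ===== LEMMAS AND PROOFS =====

-- A's rebuilt remainder ' ' :: rest behaves exactly like B's chunk loop over rest.
lemma pvWhileA_cons_space (limit : Int) (hlim : 2 ≤ limit) :
    ∀ (n : Nat) (rest : List Char), rest.length ≤ n →
      pvWhileA (' ' :: rest) limit = pvChunksB rest (limit.toNat - 1) := by
  intro n
  induction n with
  | zero =>
    intro rest hle
    have hr : rest = [] := List.eq_nil_of_length_eq_zero (Nat.le_zero.mp hle)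
    subst hr
    rw [pvWhileA, pvChunksB]
    simp only [List.length_cons, List.length_nil]
    rw [dif_neg (by omega), dif_neg (by omega)]
  | succ n ih =>
    intro rest hle
    rw [pvWhileA, pvChunksB]
    by_cases hlong : (limit.toNat - 1) < rest.length
    · have hc1 : limit < (((' ' :: rest).length : Nat) : Int) ∧ 2 ≤ limit := by
        constructor
        · simp only [List.length_cons]; omega
        · exact hlim
      rw [dif_pos hc1, dif_pos ⟨hlong, by omega⟩]
      rw [PySem.List.slice_to _ (by omega : (0:Int) ≤ limit),
          PySem.List.slice_from _ (by omega : (0:Int) ≤ limit)]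
      have htk : (' ' :: rest).take limit.toNat = ' ' :: rest.take (limit.toNat - 1) := by
        have : limit.toNat = (limit.toNat - 1) + 1 := by omega
        rw [this, List.take_succ_cons]
        have h2 : limit.toNat - 1 + 1 - 1 = limit.toNat - 1 := by omega
        rw [h2]
      have hdr : (' ' :: rest).drop limit.toNat = rest.drop (limit.toNat - 1) := by
        have : limit.toNat = (limit.toNat - 1) + 1 := by omega
        rw [this, List.drop_succ_cons]
        have h2 : limit.toNat - 1 + 1 - 1 = limit.toNat - 1 := by omega
        rw [h2]
      rw [htk, hdr]
      congr 1
      exact ih (rest.drop (limit.toNat - 1)) (by simp only [List.length_drop]; omega)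
    · rw [dif_neg (by simp only [List.length_cons]; omega), dif_neg (by omega)]

-- per-line agreement of the two loops, for limit ≥ 2
lemma line_eq (limit : Int) (hlim : 2 ≤ limit) (line : List Char) :
    pvWhileA line limit = pvLineB line limit := by
  rw [pvWhileA, pvLineB]
  by_cases hlong : (line.length : Int) ≤ limit
  · rw [dif_neg (by omega), if_pos hlong]
  · rw [dif_pos ⟨by omega, hlim⟩, if_neg hlong]
    rw [PySem.List.slice_to _ (by omega : (0:Int) ≤ limit),
        PySem.List.slice_from _ (by omega : (0:Int) ≤ limit)]
    congr 1
    exact pvWhileA_cons_space limit hlim _ (line.drop limit.toNat) le_rfl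

-- ===== VERDICT (by name: the statement is the Claim_ definition above) =====
theorem fold_lines_spec : Claim_equal_fold_lines := by
  intro s limit _hdom hpre
  unfold Spec_fold_lines fold_lines fold_lines_alt
  rcases hpre with hlim | hs
  · rw [PySem.List.foldl_append_eq_flatMap
        (fun line => (pvWhileA line.toList limit).map String.ofList)
        (PySem.Str.splitlines s) []]
    simp only [List.nil_append]
    congr 1
    congr 1
    funext line
    rw [line_eq limit hlim]
  · subst hs
    rfl
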